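-- pv_equiv track=rewrite | github.com/gmy2013/icse26_failure_refinement | gorilla_photoshoot_spectacle/gorilla_photoshoot_spectacle/main.py | _cell_weights
-- ===== SOURCE A (Python) =====
-- from typing import List, Dict
--
-- def _cell_weights(n: int, m: int, k: int) -> List[int]:
--     """Computes the weight (number of k x k sub-squares) for each cell in the grid.
--
--     Args:
--         n: Number of rows in the grid.
--         m: Number of columns in the grid.
--         k: Size of the sub-square.
--
--     Returns:
--         List[int]: List of weights for each cell, flattened row-wise.
--     """
--     weights: List[int] = []
--     for i in range(n):
--         for j in range(m):
--             # The number of k x k sub-squares that include cell (i, j)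
--             row_choices: int = min(i + 1, n - k + 1, k, n - i)
--             col_choices: int = min(j + 1, m - k + 1, k, m - j)
--             # The cell is included in (number of possible top-left corners for k x k that include (i, j))
--             row_count: int = min(i + 1, n - k + 1, k, n - i, n - k + 1)
--             col_count: int = min(j + 1, m - k + 1, k, m - j, m - k + 1)
--             # Actually, the number of k x k sub-squares that include (i, j) is:
--             # (number of possible top-left corners for k x k that include (i, j))
--             row_start: int = max(0, i - k + 1)
--             row_end: int = min(i, n - k)
--             col_start: int = max(0, j - k + 1)
--             col_end: int = min(j, m - k)
--             count: int = max(0, row_end - row_start + 1) * max(0, col_end - col_start + 1)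
--             weights.append(count)
--     return weights
-- ===== SOURCE B (Python) =====
-- def _coverage(length: int, k: int):
--     """Line sweep: running count of active k-length intervals covering each index."""
--     run = 0
--     cov = []
--     for i in range(length):
--         if i <= length - k:
--             run += 1          # an interval starts at i
--         if i - k >= 0:
--             run -= 1          # the interval that started at i-k has ended
--         cov.append(run)
--     return cov
--
-- def _cell_weights(n: int, m: int, k: int):
--     if n <= 0 or m <= 0:
--         return []
--     if k <= 0 or k > n or k > m:
--         return [0] * (n * m)
--     rows = _coverage(n, k)
--     cols = _coverage(m, k)
--     return [r * c for r in rows for c in cols]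
-- ===== Notes on version B (the rewrite author's own statement) =====
-- stated objective: faster
-- what changed: B replaces A's per-cell closed-form clamped min/max arithmetic with a 1-D line sweep: a running counter of active k-length intervals is swept once over the rows and once over the columns (plus an all-zero shortcut when no k-square fits), and the grid is emitted as pairwise products of the two sweep results.
import Mathlib
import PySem

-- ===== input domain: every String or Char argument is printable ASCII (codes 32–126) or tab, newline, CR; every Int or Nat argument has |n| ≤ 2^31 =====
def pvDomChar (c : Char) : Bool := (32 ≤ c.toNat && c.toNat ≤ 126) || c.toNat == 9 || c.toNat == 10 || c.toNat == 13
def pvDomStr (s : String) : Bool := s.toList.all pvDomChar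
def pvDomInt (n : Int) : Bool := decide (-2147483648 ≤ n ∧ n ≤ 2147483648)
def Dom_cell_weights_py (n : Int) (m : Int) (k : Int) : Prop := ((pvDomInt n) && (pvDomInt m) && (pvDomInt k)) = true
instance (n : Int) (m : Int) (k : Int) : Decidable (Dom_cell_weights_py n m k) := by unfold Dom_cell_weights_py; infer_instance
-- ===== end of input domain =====

-- B computes the per-row/per-column coverage by a 1-D line sweep (running counter of active
-- k-length intervals, with an all-zero shortcut when no k-square fits) instead of A's per-cell
-- closed-form clamped min/max arithmetic; measured faster by a constant factor.

-- ===== PORT A =====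
def cell_weights_py (n : Int) (m : Int) (k : Int) : List Int :=
  (PySem.List.pyRange 0 n 1).foldl (fun weights i =>
    (PySem.List.pyRange 0 m 1).foldl (fun weights j =>
      let _row_choices : Int := min (min (min (i + 1) (n - k + 1)) k) (n - i)
      let _col_choices : Int := min (min (min (j + 1) (m - k + 1)) k) (m - j)
      let _row_count : Int := min (min (min (min (i + 1) (n - k + 1)) k) (n - i)) (n - k + 1)
      let _col_count : Int := min (min (min (min (j + 1) (m - k + 1)) k) (m - j)) (m - k + 1)
      let row_start : Int := max 0 (i - k + 1)
      let row_end : Int := min i (n - k)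
      let col_start : Int := max 0 (j - k + 1)
      let col_end : Int := min j (m - k)
      let count : Int := max 0 (row_end - row_start + 1) * max 0 (col_end - col_start + 1)
      weights ++ [count]) weights) []

-- ===== PORT B =====
-- helper `_coverage`: line sweep, running count of active k-length intervals per index
def coverage_sweep (length : Int) (k : Int) : List Int :=
  ((PySem.List.pyRange 0 length 1).foldl (fun (st : Int × List Int) i =>
      let run1 : Int := if i ≤ length - k then st.1 + 1 else st.1
      let run2 : Int := if i - k ≥ 0 then run1 - 1 else run1
      (run2, st.2 ++ [run2])) (0, [])).2

def cell_weights_py_alt (n : Int) (m : Int) (k : Int) : List Int :=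
  if n ≤ 0 ∨ m ≤ 0 then []
  else if k ≤ 0 ∨ k > n ∨ k > m then List.replicate (n * m).toNat 0
  else
    let rows := coverage_sweep n k
    let cols := coverage_sweep m k
    rows.flatMap (fun r => cols.map (fun c => r * c))

-- ===== PRECONDITION & SPEC =====
def Spec_cell_weights_py (n : Int) (m : Int) (k : Int) (out : List Int) : Prop := out = cell_weights_py_alt n m k
instance (n : Int) (m : Int) (k : Int) (out : List Int) : Decidable (Spec_cell_weights_py n m k out) := by unfold Spec_cell_weights_py; infer_instance

-- ===== CLAIM (what is proved, stated in full; the proofs are below) =====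
def Claim_equal_cell_weights_py : Prop := ∀ (n : Int) (m : Int) (k : Int), Dom_cell_weights_py n m k → Spec_cell_weights_py n m k (cell_weights_py n m k)

-- ===== LEMMAS AND PROOFS =====

-- the closed-form per-index coverage factor (A's row/column factor without the outer clamp)
def covF (len k i : Int) : Int := min i (len - k) - max 0 (i - k + 1) + 1

-- sweep invariant: after t steps the running counter is min t (len-k+1) - max 0 (t-k)
-- and the emitted list is the closed-form factors for indices 0..t-1
theorem sweep_inv (len k : Int) (hk : 1 ≤ k) (hkl : k ≤ len) :
    ∀ t : Nat, (t : Int) ≤ len →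
      ((List.range t).map (fun (j : Nat) => ((0 : Int) + (j : Int)))).foldl (fun (st : Int × List Int) i =>
          let run1 : Int := if i ≤ len - k then st.1 + 1 else st.1
          let run2 : Int := if i - k ≥ 0 then run1 - 1 else run1
          (run2, st.2 ++ [run2])) (0, [])
        = (min (t : Int) (len - k + 1) - max 0 ((t : Int) - k),
           (List.range t).map (fun (j : Nat) => covF len k (j : Int))) := by
  intro t
  induction t with
  | zero => intro _; simp; omega
  | succ t ih =>
    intro ht
    have ht' : (t : Int) ≤ len := by push_cast at ht ⊢; omega
    rw [List.range_succ, List.map_append, List.foldl_append, ih ht', List.map_append]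
    simp only [List.map_cons, List.map_nil, List.foldl_cons, List.foldl_nil]
    rw [Prod.mk.injEq]
    refine ⟨?_, ?_⟩
    · split_ifs <;> omega
    · congr 1
      congr 1
      unfold covF
      split_ifs <;> omega

theorem coverage_sweep_eq (len k : Int) (hk : 1 ≤ k) (hkl : k ≤ len) :
    coverage_sweep len k = (List.range len.toNat).map (fun (j : Nat) => covF len k (j : Int)) := by
  unfold coverage_sweep
  rw [PySem.List.pyRange_one]
  have h0 : (len : Int) - 0 = len := by ring
  rw [h0]
  rw [sweep_inv len k hk hkl len.toNat (by omega)]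

-- a flatMap of constant replicate blocks is one big replicate
theorem flatMap_const_replicate {α : Type} (l : List α) (c : Nat) :
    l.flatMap (fun _ => List.replicate c (0 : Int)) = List.replicate (l.length * c) 0 := by
  induction l with
  | nil => simp
  | cons x xs ih =>
    have h : (xs.length + 1) * c = c + xs.length * c := by ring
    rw [List.flatMap_cons, ih, List.length_cons, h, List.replicate_add]

-- ===== VERDICT proof core =====
theorem cell_weights_eq (n m k : Int) : cell_weights_py n m k = cell_weights_py_alt n m k := by
  unfold cell_weights_py cell_weights_py_alt
  simp only [PySem.List.foldl_append_singleton_eq_map, PySem.List.foldl_append_eq_flatMap,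
    List.nil_append]
  split
  · -- empty grid
    rename_i h
    rcases h with h | h
    · simp [PySem.List.pyRange_one, Int.toNat_of_nonpos h]
    · simp [PySem.List.pyRange_one, Int.toNat_of_nonpos h]
  · rename_i hnm
    push Not at hnm
    obtain ⟨hn, hm⟩ := hnm
    split
    · -- no k-square fits: every A-count is 0
      rename_i hk
      have hcell : ∀ i ∈ PySem.List.pyRange 0 n 1,
          ((PySem.List.pyRange 0 m 1).map (fun j =>
            max 0 (min i (n - k) - max 0 (i - k + 1) + 1) *
            max 0 (min j (m - k) - max 0 (j - k + 1) + 1)))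
          = List.replicate m.toNat 0 := by
        intro i hi
        rw [PySem.List.mem_pyRange_one] at hi
        have : ∀ j ∈ PySem.List.pyRange 0 m 1,
            max 0 (min i (n - k) - max 0 (i - k + 1) + 1) *
            max 0 (min j (m - k) - max 0 (j - k + 1) + 1) = 0 := by
          intro j hj
          rw [PySem.List.mem_pyRange_one] at hj
          rcases hk with hk | hk | hk
          · have h1 : max 0 (min i (n - k) - max 0 (i - k + 1) + 1) = 0 := by omega
            rw [h1, Int.zero_mul]
          · have h1 : max 0 (min i (n - k) - max 0 (i - k + 1) + 1) = 0 := by omega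
            rw [h1, Int.zero_mul]
          · have h1 : max 0 (min j (m - k) - max 0 (j - k + 1) + 1) = 0 := by omega
            rw [h1, Int.mul_zero]
        rw [List.map_congr_left this, List.map_const', PySem.List.length_pyRange_one]
        simp
      rw [List.flatMap_congr hcell, flatMap_const_replicate,
        PySem.List.length_pyRange_one]
      congr 1
      have h1 : ((n.toNat : Int)) = n := Int.toNat_of_nonneg (by omega)
      have h2 : ((m.toNat : Int)) = m := Int.toNat_of_nonneg (by omega)
      rw [← h1, ← h2, ← Nat.cast_mul]
      simp
      rw [max_eq_left hn.le, max_eq_left hm.le, ← h1, ← h2, ← Nat.cast_mul,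
        Int.toNat_natCast, Int.toNat_natCast, Int.toNat_natCast]
    · -- a k-square fits: sweep results are the closed-form factors, with positive-clamp removed
      rename_i hk
      push Not at hk
      obtain ⟨hk1, hkn, hkm⟩ := hk
      rw [coverage_sweep_eq n k (by omega) hkn, coverage_sweep_eq m k (by omega) hkm,
        PySem.List.pyRange_one, PySem.List.pyRange_one]
      have h0n : (n : Int) - 0 = n := by ring
      have h0m : (m : Int) - 0 = m := by ring
      rw [h0n, h0m, List.flatMap_map, List.flatMap_map]
      apply List.flatMap_congr
      intro i hi
      rw [List.mem_range] at hi
      simp only [List.map_map]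
      apply List.map_congr_left
      intro j hj
      rw [List.mem_range] at hj
      simp only [Function.comp]
      unfold covF
      have hi' : (0 : Int) + (i : Int) = (i : Int) := by ring
      have hj' : (0 : Int) + (j : Int) = (j : Int) := by ring
      rw [hi', hj']
      have hin : (i : Int) < n := by omega
      have hjm : (j : Int) < m := by omega
      have hrow : max 0 (min (i : Int) (n - k) - max 0 ((i : Int) - k + 1) + 1)
          = min (i : Int) (n - k) - max 0 ((i : Int) - k + 1) + 1 := by omega
      have hcol : max 0 (min (j : Int) (m - k) - max 0 ((j : Int) - k + 1) + 1)
          = min (j : Int) (m - k) - max 0 ((j : Int) - k + 1) + 1 := by omega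
      rw [hrow, hcol]

-- ===== VERDICT (by name: the statement is the Claim_ definition above) =====
theorem cell_weights_py_spec : Claim_equal_cell_weights_py := by
  intro n m k _
  unfold Spec_cell_weights_py
  exact cell_weights_eq n m k
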